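-- pv_equiv track=rewrite | github.com/supervik/hummingbot | scripts/vi_get_all_triangle_pairs.py | divide_pairs_by_quote_asset
-- ===== SOURCE A (Python) =====
-- def divide_pairs_by_quote_asset(pairs):
--     """
--     Returns dictionary of assets that are filtered by quote asset:
--         {"BTC": ["ETH", "ADA", "XMR"],
--         "USDT": ["ETH", "BTC", "ADA"]}
--     """
--     quotes = {}
--     for pair in pairs:
--         base, quote = pair.split("-")
--         if quote in quotes:
--             quotes[quote].append(base)
--         else:
--             quotes[quote] = [base]
--     return quotes
-- ===== SOURCE B (Python) =====
-- def divide_pairs_by_quote_asset(pairs):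
--     """
--     Returns dictionary of assets that are filtered by quote asset:
--         {"BTC": ["ETH", "ADA", "XMR"],
--         "USDT": ["ETH", "BTC", "ADA"]}
--     """
--     # Pass 1: unpack every pair (same ValueError as A on malformed pairs).
--     split_pairs = []
--     for pair in pairs:
--         base, quote = pair.split("-")
--         split_pairs.append((base, quote))
--     # Pass 2: for each first occurrence of a quote, collect all its bases at once.
--     result = {}
--     for _, quote in split_pairs:
--         if quote not in result:
--             result[quote] = [b for b, q in split_pairs if q == quote]
--     return result
-- ===== Notes on version B (the rewrite author's own statement) =====
-- stated objective: alternative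
-- what changed: Replaces A's single scan that maintains a growing dict (append-or-create per pair) with two passes: split every pair first, then for each first occurrence of a quote build its whole base list in one comprehension over the split pairs.
import Mathlib
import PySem

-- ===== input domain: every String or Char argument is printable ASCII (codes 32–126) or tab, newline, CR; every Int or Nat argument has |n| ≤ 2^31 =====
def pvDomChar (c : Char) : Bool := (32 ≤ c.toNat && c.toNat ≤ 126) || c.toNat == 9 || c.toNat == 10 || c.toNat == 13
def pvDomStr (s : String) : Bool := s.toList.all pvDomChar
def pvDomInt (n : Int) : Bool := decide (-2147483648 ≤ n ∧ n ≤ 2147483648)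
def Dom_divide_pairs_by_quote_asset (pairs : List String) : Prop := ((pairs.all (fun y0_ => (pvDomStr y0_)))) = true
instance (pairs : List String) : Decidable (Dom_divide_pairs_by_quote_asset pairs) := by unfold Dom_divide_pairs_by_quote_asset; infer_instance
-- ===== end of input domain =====

-- B replaces A's single scan with a maintained dict by two passes: split all pairs first,
-- then for the first occurrence of each quote collect all of its bases in one comprehension
-- (alternative decomposition, same result in the same order; not claimed faster).

-- ===== PORT A =====
-- A's loop: for each pair, unpack base/quote and append to (or create) quotes[quote].
def divide_pairs_by_quote_asset (pairs : List String) : List (String × List String) :=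
  (pairs.foldl (fun quotes pair =>
      let parts := (PySem.Str.split? pair "-").getD []
      let base := parts.getD 0 ""
      let quote := parts.getD 1 ""
      if quotes.contains quote then
        quotes.insert quote (quotes.getD quote [] ++ [base])
      else
        quotes.insert quote [base]) PySem.Dict.empty).items

-- ===== PORT B =====
def divide_pairs_by_quote_asset_alt (pairs : List String) : List (String × List String) :=
  let split_pairs := pairs.map (fun pair =>
      let parts := (PySem.Str.split? pair "-").getD []
      (parts.getD 0 "", parts.getD 1 ""))
  (split_pairs.foldl (fun result bq =>
      if result.contains bq.2 then result
      else result.insert bq.2 ((split_pairs.filter (fun p => p.2 == bq.2)).map (·.1)))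
    PySem.Dict.empty).items

-- ===== PRECONDITION & SPEC =====
-- Pre_ excludes exactly the inputs where A's 'base, quote = pair.split("-")' raises
-- ValueError (a pair without exactly one '-'); B raises the same ValueError there.
def Pre_divide_pairs_by_quote_asset (pairs : List String) : Prop :=
  ∀ p ∈ pairs, ((PySem.Str.split? p "-").getD []).length = 2
instance (pairs : List String) : Decidable (Pre_divide_pairs_by_quote_asset pairs) := by unfold Pre_divide_pairs_by_quote_asset; infer_instance

def pvWitness_divide_pairs_by_quote_asset : List String := ["ETH-BTC", "ADA-BTC", "ETH-USDT"]

def Spec_divide_pairs_by_quote_asset (pairs : List String) (out : List (String × List String)) : Prop := out = divide_pairs_by_quote_asset_alt pairs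
instance (pairs : List String) (out : List (String × List String)) : Decidable (Spec_divide_pairs_by_quote_asset pairs out) := by unfold Spec_divide_pairs_by_quote_asset; infer_instance

-- ===== CLAIM (what is proved, stated in full; the proofs are below) =====
def Claim_equal_divide_pairs_by_quote_asset : Prop := ∀ (pairs : List String), Dom_divide_pairs_by_quote_asset pairs → Pre_divide_pairs_by_quote_asset pairs → Spec_divide_pairs_by_quote_asset pairs (divide_pairs_by_quote_asset pairs)

-- ===== LEMMAS AND PROOFS =====

-- the split of one pair, shared shape of both ports
def pvSplit (pair : String) : String × String :=
  let parts := (PySem.Str.split? pair "-").getD []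
  (parts.getD 0 "", parts.getD 1 "")

-- the final dicts of the two folds, named for the proofs
def pvDA (pairs : List String) : PySem.Dict String (List String) :=
  (pairs.map (fun s => ((pvSplit s).2, (pvSplit s).1))).foldl
    (fun d p => d.modify p.1 [] (· ++ [p.2])) PySem.Dict.empty

def pvDB (pairs : List String) : PySem.Dict String (List String) :=
  (pairs.map pvSplit).foldl (fun result bq =>
      if result.contains bq.2 then result
      else result.insert bq.2 (((pairs.map pvSplit).filter (fun p => p.2 == bq.2)).map (·.1)))
    PySem.Dict.empty

-- A's branch is exactly Dict.modify with default []
lemma stepA_eq_modify (d : PySem.Dict String (List String)) (q b : String) :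
    (if d.contains q then d.insert q (d.getD q [] ++ [b]) else d.insert q [b])
      = d.modify q [] (· ++ [b]) := by
  by_cases h : d.contains q = true
  · simp [h, PySem.Dict.modify]
  · simp at h
    simp [h, PySem.Dict.modify, PySem.Dict.getD_of_not_contains d [] h]

lemma A_eq_items (pairs : List String) :
    divide_pairs_by_quote_asset pairs = (pvDA pairs).items := by
  unfold divide_pairs_by_quote_asset pvDA
  congr 1
  rw [List.foldl_map]
  induction pairs using List.reverseRecOn with
  | nil => rfl
  | append_singleton l x ih =>
    rw [List.foldl_append, List.foldl_append, ih, List.foldl_cons, List.foldl_nil,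
        List.foldl_cons, List.foldl_nil]
    exact stepA_eq_modify _ (pvSplit x).2 (pvSplit x).1

lemma B_eq_items (pairs : List String) :
    divide_pairs_by_quote_asset_alt pairs = (pvDB pairs).items := rfl

-- keys of B's fold: first-occurrence set of the quotes seen so far
lemma keys_foldB (sp full : List (String × String))
    (d : PySem.Dict String (List String)) :
    (sp.foldl (fun result bq =>
        if result.contains bq.2 then result
        else result.insert bq.2 ((full.filter (fun p => p.2 == bq.2)).map (·.1))) d).keys
      = PySem.Set.update d.keys (sp.map (·.2)) := by
  induction sp generalizing d with
  | nil => simp [PySem.Set.update]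
  | cons hd tl ih =>
    simp only [List.foldl_cons, List.map_cons, PySem.Set.update_cons]
    by_cases h : d.contains hd.2 = true
    · rw [if_pos h, ih, PySem.Set.add_of_mem]
      exact (PySem.Dict.contains_iff_mem_keys d hd.2).mp h
    · simp at h
      rw [if_neg (by simp [h]), ih, PySem.Dict.keys_insert_of_not_contains d _ h,
          PySem.Set.add_of_not_mem]
      intro hm
      exact absurd ((PySem.Dict.contains_iff_mem_keys d hd.2).mpr hm) (by simp [h])

-- lookups in B's fold: the first occurrence of a quote freezes the full filtered value
lemma getD_foldB (sp full : List (String × String))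
    (d : PySem.Dict String (List String)) (q : String) :
    (sp.foldl (fun result bq =>
        if result.contains bq.2 then result
        else result.insert bq.2 ((full.filter (fun p => p.2 == bq.2)).map (·.1))) d).getD q []
      = if d.contains q then d.getD q []
        else if q ∈ sp.map (·.2) then (full.filter (fun p => p.2 == q)).map (·.1)
        else [] := by
  induction sp generalizing d with
  | nil =>
    by_cases h : d.contains q = true
    · simp [h]
    · simp at h
      simp [h, PySem.Dict.getD_of_not_contains d [] h]
  | cons hd tl ih =>
    simp only [List.foldl_cons, List.map_cons, List.mem_cons]
    by_cases h : d.contains hd.2 = true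
    · rw [if_pos h, ih]
      by_cases hq : d.contains q = true
      · simp [hq]
      · simp at hq
        by_cases he : q = hd.2
        · exact absurd (he ▸ h) (by simp [hq])
        · by_cases hm2 : q ∈ tl.map (·.2) <;> simp [hq, he, hm2]
    · simp at h
      rw [if_neg (by simp [h]), ih]
      by_cases he : q = hd.2
      · subst he
        by_cases hm : hd.2 ∈ tl.map (·.2) <;>
          simp [PySem.Dict.contains_insert_self, PySem.Dict.getD_insert_self, h, hm]
      · rw [PySem.Dict.getD_insert_of_ne d _ _ he, PySem.Dict.contains_insert]
        by_cases hq : d.contains q = true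
        · simp [hq]
        · by_cases hm2 : q ∈ tl.map (·.2) <;> simp [hq, he, hm2]

lemma keys_DA (pairs : List String) :
    (pvDA pairs).keys = PySem.Set.ofList (pairs.map (fun s => (pvSplit s).2)) := by
  unfold pvDA
  rw [show (fun (d : PySem.Dict String (List String)) (p : String × String) =>
        d.modify p.1 [] (· ++ [p.2]))
      = (fun d p => d.modify (Prod.fst p) [] ((fun (_ : PySem.Dict String (List String))
          (p : String × String) (v : List String) => v ++ [p.2]) d p)) from rfl]
  rw [PySem.Dict.keys_foldl_modify_key]
  simp [PySem.Set.update_nil_left, List.map_map, Function.comp_def]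

lemma keys_DB (pairs : List String) :
    (pvDB pairs).keys = PySem.Set.ofList (pairs.map (fun s => (pvSplit s).2)) := by
  unfold pvDB
  rw [keys_foldB]
  simp [PySem.Set.update_nil_left, List.map_map, Function.comp_def]

lemma getD_DA_eq_DB (pairs : List String) (q : String) :
    (pvDA pairs).getD q [] = (pvDB pairs).getD q [] := by
  have hA : (pvDA pairs).getD q []
      = ((pairs.map (fun s => ((pvSplit s).2, (pvSplit s).1))).filter
          (fun p => p.1 == q)).map (·.2) := by
    unfold pvDA
    rw [PySem.Dict.getD_foldl_modify_append]
    simp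
  have hBv := getD_foldB (pairs.map pvSplit) (pairs.map pvSplit) PySem.Dict.empty q
  rw [show ((pairs.map pvSplit).foldl (fun result bq =>
      if result.contains bq.2 then result
      else result.insert bq.2 (((pairs.map pvSplit).filter (fun p => p.2 == bq.2)).map (·.1)))
      PySem.Dict.empty) = pvDB pairs from rfl] at hBv
  rw [hA, hBv]
  simp only [PySem.Dict.contains_empty, Bool.false_eq_true, if_false]
  by_cases hm : q ∈ (pairs.map pvSplit).map (·.2)
  · rw [if_pos hm]
    simp [List.filter_map, List.map_map, Function.comp_def]
  · have hq' : ∀ s ∈ pairs, ¬(pvSplit s).2 = q := by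
      intro s hs hq
      refine hm ?_
      simp only [List.map_map, List.mem_map, Function.comp_def]
      exact ⟨s, hs, hq⟩
    rw [if_neg hm]
    simp only [List.filter_map, List.map_map, Function.comp_def, List.map_eq_nil_iff,
      List.filter_eq_nil_iff, beq_iff_eq]
    exact hq'

theorem pv_main (pairs : List String) :
    divide_pairs_by_quote_asset pairs = divide_pairs_by_quote_asset_alt pairs := by
  rw [A_eq_items, B_eq_items]
  have hndA : (pvDA pairs).keys.Nodup := by rw [keys_DA]; exact PySem.Set.nodup_ofList _
  have hndB : (pvDB pairs).keys.Nodup := by rw [keys_DB]; exact PySem.Set.nodup_ofList _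
  rw [PySem.Dict.items_eq_map_keys (pvDA pairs) hndA [],
      PySem.Dict.items_eq_map_keys (pvDB pairs) hndB [], keys_DA, keys_DB]
  exact List.map_congr_left (fun q _ => by rw [getD_DA_eq_DB pairs q])

-- ===== VERDICT (by name: the statement is the Claim_ definition above) =====
theorem divide_pairs_by_quote_asset_spec : Claim_equal_divide_pairs_by_quote_asset := by
  intro pairs _ _
  unfold Spec_divide_pairs_by_quote_asset
  exact pv_main pairs
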